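-- pv_equiv track=rewrite | github.com/CurrencyDev/SeasonalWeather | seasonalweather/alert_builder.py | _find_body_start
-- ===== SOURCE A (Python) =====
-- from typing import List
--
-- def _find_body_start(lines: List[str]) -> int:
--     # Prefer the NWS headline marker (often where meaningful narration begins)
--     for i, ln in enumerate(lines):
--         s = (ln or "").strip()
--         if s.startswith("...") and s.endswith("...") and len(s) >= 12:
--             return i
--
--     # Otherwise prefer the normal NWS narrative intro
--     for i, ln in enumerate(lines):
--         s = (ln or "").strip().lower()
--         if s.startswith("the national weather service"):
--             return i
--
--     # Fallback: first “has issued”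
--     for i, ln in enumerate(lines):
--         s = (ln or "").strip().lower()
--         if "has issued" in s and "national weather service" in s:
--             return i
--     return 0
-- ===== SOURCE B (Python) =====
-- from typing import List
--
-- def _find_body_start(lines: List[str]) -> int:
--     # Single pass maintaining the first-match index of each marker tier;
--     # priority is resolved once at the end.
--     idx_headline = idx_intro = idx_fallback = None
--     for i, ln in enumerate(lines):
--         s = (ln or "").strip()
--         sl = s.lower()
--         if idx_headline is None and s.startswith("...") and s.endswith("...") and len(s) >= 12:
--             idx_headline = i
--         if idx_intro is None and sl.startswith("the national weather service"):
--             idx_intro = i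
--         if idx_fallback is None and "has issued" in sl and "national weather service" in sl:
--             idx_fallback = i
--     if idx_headline is not None:
--         return idx_headline
--     if idx_intro is not None:
--         return idx_intro
--     if idx_fallback is not None:
--         return idx_fallback
--     return 0
-- ===== Notes on version B (the rewrite author's own statement) =====
-- stated objective: alternative
-- what changed: Replaces A's three sequential full scans (each re-stripping/lowering every line) with one pass over enumerate(lines) that maintains the first-match index for each of the three markers and resolves priority after the loop.
import Mathlib
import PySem

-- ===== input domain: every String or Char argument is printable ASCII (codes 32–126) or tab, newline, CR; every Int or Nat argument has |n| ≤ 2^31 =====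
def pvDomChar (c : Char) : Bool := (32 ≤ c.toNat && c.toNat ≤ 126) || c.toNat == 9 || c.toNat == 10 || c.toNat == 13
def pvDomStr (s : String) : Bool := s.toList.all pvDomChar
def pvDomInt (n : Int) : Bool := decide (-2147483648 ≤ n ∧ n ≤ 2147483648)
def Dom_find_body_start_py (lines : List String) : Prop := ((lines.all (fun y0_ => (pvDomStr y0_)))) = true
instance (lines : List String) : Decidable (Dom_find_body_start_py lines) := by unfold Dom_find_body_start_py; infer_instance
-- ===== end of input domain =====

-- B replaces A's three sequential full scans by ONE pass that maintains the
-- first-match index of each marker tier and resolves the priority at the end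
-- (objective: alternative decomposition; same results).

-- ===== PORT A =====
-- A: first loop — headline marker '...X...' with len >= 12
def aScan1 (i : Int) : List String → Option Int
  | [] => none
  | ln :: rest =>
    let s := PySem.Str.strip ln
    if PySem.Str.startswith s "..." && PySem.Str.endswith s "..." && decide (12 ≤ PySem.Str.len s)
    then some i else aScan1 (i + 1) rest

-- A: second loop — narrative intro
def aScan2 (i : Int) : List String → Option Int
  | [] => none
  | ln :: rest =>
    let s := PySem.Str.lower (PySem.Str.strip ln)
    if PySem.Str.startswith s "the national weather service"
    then some i else aScan2 (i + 1) rest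

-- A: third loop — 'has issued' fallback
def aScan3 (i : Int) : List String → Option Int
  | [] => none
  | ln :: rest =>
    let s := PySem.Str.lower (PySem.Str.strip ln)
    if PySem.Str.isIn "has issued" s && PySem.Str.isIn "national weather service" s
    then some i else aScan3 (i + 1) rest

def find_body_start_py (lines : List String) : Int :=
  match aScan1 0 lines with
  | some i => i
  | none =>
    match aScan2 0 lines with
    | some i => i
    | none =>
      match aScan3 0 lines with
      | some i => i
      | none => 0

-- ===== PORT B =====
-- B: one step of the single pass; state = (idx_headline, idx_intro, idx_fallback)
def bStep (st : Option Int × Option Int × Option Int) (p : Int × String) :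
    Option Int × Option Int × Option Int :=
  let s := PySem.Str.strip p.2
  let sl := PySem.Str.lower s
  (if st.1.isNone && (PySem.Str.startswith s "..." && PySem.Str.endswith s "..." && decide (12 ≤ PySem.Str.len s))
     then some p.1 else st.1,
   if st.2.1.isNone && PySem.Str.startswith sl "the national weather service"
     then some p.1 else st.2.1,
   if st.2.2.isNone && (PySem.Str.isIn "has issued" sl && PySem.Str.isIn "national weather service" sl)
     then some p.1 else st.2.2)

def find_body_start_py_alt (lines : List String) : Int :=
  let st := (PySem.List.enumerate lines 0).foldl bStep (none, none, none)
  st.1.getD (st.2.1.getD (st.2.2.getD 0))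

-- ===== PRECONDITION & SPEC =====
def Spec_find_body_start_py (lines : List String) (out : Int) : Prop := out = find_body_start_py_alt lines
instance (lines : List String) (out : Int) : Decidable (Spec_find_body_start_py lines out) := by unfold Spec_find_body_start_py; infer_instance

-- ===== CLAIM (what is proved, stated in full; the proofs are below) =====
def Claim_equal_find_body_start_py : Prop := ∀ (lines : List String), Dom_find_body_start_py lines → Spec_find_body_start_py lines (find_body_start_py lines)

-- ===== LEMMAS AND PROOFS =====
-- The single pass computes exactly the three first-match indices of A's scans,
-- each seeded by the incoming state component (first match wins).
theorem bStep_fold_spec (lines : List String) (i : Int)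
    (st : Option Int × Option Int × Option Int) :
    (PySem.List.enumerate lines i).foldl bStep st =
      ((st.1.rec (aScan1 i lines) (fun v => some v) : Option Int),
       (st.2.1.rec (aScan2 i lines) (fun v => some v) : Option Int),
       (st.2.2.rec (aScan3 i lines) (fun v => some v) : Option Int)) := by
  induction lines generalizing i st with
  | nil =>
    obtain ⟨h, n, f⟩ := st
    cases h <;> cases n <;> cases f <;>
      simp [PySem.List.enumerate_nil, aScan1, aScan2, aScan3]
  | cons ln rest ih =>
    rw [PySem.List.enumerate_cons, List.foldl_cons, ih]
    obtain ⟨h, n, f⟩ := st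
    show _ = (_, _, _)
    refine Prod.ext ?_ (Prod.ext ?_ ?_)
    · cases h <;> simp [bStep, aScan1] <;> split <;> simp
    · cases n <;> simp [bStep, aScan2] <;> split <;> simp
    · cases f <;> simp [bStep, aScan3] <;> split <;> simp

-- ===== VERDICT (by name: the statement is the Claim_ definition above) =====
theorem find_body_start_py_spec : Claim_equal_find_body_start_py := by
  intro lines _
  unfold Spec_find_body_start_py find_body_start_py find_body_start_py_alt
  rw [bStep_fold_spec]
  cases aScan1 0 lines <;> cases aScan2 0 lines <;> cases aScan3 0 lines <;> simp
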